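-- pv_equiv track=rewrite | github.com/cpa/skol | src/guesses.py | split_by_quote_char
-- ===== SOURCE A (Python) =====
-- def split_by_quote_char(data, quote_char):
--     # Note that this trick can return a char that is larger than the
--     # larger unicode char (but "in real life" that does not happen)
--     replacer = chr(ord(max(data + quote_char)) + 1)
--
--     data = data.replace("\\" + quote_char, replacer)
--
--     result = []
--     accumulator = []
--     inside_quote = False
--     for c in data:
--         if c == quote_char:
--             if inside_quote:
--                 result.append(("".join(accumulator), "INSIDE"))
--             else:
--                 result.append(("".join(accumulator), "OUTSIDE"))
--             accumulator = []
--             inside_quote = not inside_quote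
--         else:
--             accumulator.append(c)
--     if inside_quote:
--         result.append(("".join(accumulator), "INSIDE"))
--     else:
--         result.append(("".join(accumulator), "OUTSIDE"))
--
--     result = [
--         (fragment.replace(replacer, "\\" + quote_char), status)
--         for fragment, status in result
--     ]
--
--     return result
-- ===== SOURCE B (Python) =====
-- def split_by_quote_char(data, quote_char):
--     # Same sentinel trick as the original: a char above every char present.
--     replacer = chr(ord(max(data + quote_char)) + 1)
--     escaped = "\\" + quote_char
--     masked = data.replace(escaped, replacer)
--     # A quote delimiter is a single character; any other quote_char never
--     # matches a single char of data, so the whole string is one fragment.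
--     parts = masked.split(quote_char) if len(quote_char) == 1 else [masked]
--     return [
--         (part.replace(replacer, escaped), "OUTSIDE" if i % 2 == 0 else "INSIDE")
--         for i, part in enumerate(parts)
--     ]
-- ===== Notes on version B (the rewrite author's own statement) =====
-- stated objective: simpler
-- what changed: The character-by-character scan with an accumulator list and a toggling inside_quote flag is replaced by a single str.split on the quote char, with each fragment's status derived from its position parity (even = OUTSIDE, odd = INSIDE); the per-char Python loop becomes one C-level split, a constant-factor speedup.
import Mathlib
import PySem

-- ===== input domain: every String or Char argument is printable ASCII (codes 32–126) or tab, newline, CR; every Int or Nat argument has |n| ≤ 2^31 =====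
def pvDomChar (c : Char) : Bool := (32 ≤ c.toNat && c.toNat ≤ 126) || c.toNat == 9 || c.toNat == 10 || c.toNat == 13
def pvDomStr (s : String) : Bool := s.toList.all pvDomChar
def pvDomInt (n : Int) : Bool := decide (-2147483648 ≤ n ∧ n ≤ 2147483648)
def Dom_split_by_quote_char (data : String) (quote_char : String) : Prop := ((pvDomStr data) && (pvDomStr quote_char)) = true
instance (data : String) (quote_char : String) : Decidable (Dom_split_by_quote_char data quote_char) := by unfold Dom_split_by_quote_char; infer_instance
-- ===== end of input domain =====

-- B replaces A's char-by-char scan (accumulator + toggling flag) by one split on the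
-- quote char with the status of each fragment derived from its index parity (simpler).

-- ===== PORT A =====
-- the for-loop over the masked string, state = (result, accumulator, inside_quote);
-- the Python compares each 1-char string c to quote_char, hence the test [c] = qc
def pvLoopA (qc : List Char) : List Char → List Char → Bool → List (List Char × String)
  | [], acc, inside => [(acc, if inside then "INSIDE" else "OUTSIDE")]
  | c :: cs, acc, inside =>
    if [c] = qc then
      (acc, if inside then "INSIDE" else "OUTSIDE") :: pvLoopA qc cs [] (!inside)
    else
      pvLoopA qc cs (acc ++ [c]) inside

def split_by_quote_char (data : String) (quote_char : String) : List (String × String) :=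
  -- replacer = chr(ord(max(data + quote_char)) + 1); max('') raises ValueError → outside Pre_
  match PySem.List.max? (data.toList ++ quote_char.toList) (fun c => c) with
  | none => []
  | some m =>
    let replacer : Char := Char.ofNat (m.toNat + 1)
    let masked := PySem.Chars.replace data.toList ('\\' :: quote_char.toList) [replacer]
    let result := pvLoopA quote_char.toList masked [] false
    result.map (fun fs =>
      (String.ofList (PySem.Chars.replace fs.1 [replacer] ('\\' :: quote_char.toList)), fs.2))

-- ===== PORT B =====
def split_by_quote_char_alt (data : String) (quote_char : String) : List (String × String) :=
  match PySem.List.max? (data.toList ++ quote_char.toList) (fun c => c) with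
  | none => []
  | some m =>
    let replacer : Char := Char.ofNat (m.toNat + 1)
    let escaped := '\\' :: quote_char.toList
    let masked := PySem.Chars.replace data.toList escaped [replacer]
    let parts :=
      match quote_char.toList with
      | [q] => masked.splitOn q       -- masked.split(quote_char), single-char separator
      | _ => [masked]
    (PySem.List.enumerate parts).map (fun ip =>
      (String.ofList (PySem.Chars.replace ip.2 [replacer] escaped),
       if PySem.Int.mod ip.1 2 == 0 then "OUTSIDE" else "INSIDE"))

-- ===== PRECONDITION & SPEC =====
-- Pre_ excludes only data = "" with quote_char = "", where A's max('') raises ValueError (B raises too).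
def Pre_split_by_quote_char (data : String) (quote_char : String) : Prop :=
  data.toList ++ quote_char.toList ≠ []
instance (data : String) (quote_char : String) : Decidable (Pre_split_by_quote_char data quote_char) := by unfold Pre_split_by_quote_char; infer_instance

def pvWitness_split_by_quote_char : String × String := ("say \\\"hi\\\" to \"the world\"", "\"")

def Spec_split_by_quote_char (data : String) (quote_char : String) (out : List (String × String)) : Prop := out = split_by_quote_char_alt data quote_char
instance (data : String) (quote_char : String) (out : List (String × String)) : Decidable (Spec_split_by_quote_char data quote_char out) := by unfold Spec_split_by_quote_char; infer_instance

-- ===== CLAIM (what is proved, stated in full; the proofs are below) =====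
def Claim_equal_split_by_quote_char : Prop := ∀ (data : String) (quote_char : String), Dom_split_by_quote_char data quote_char → Pre_split_by_quote_char data quote_char → Spec_split_by_quote_char data quote_char (split_by_quote_char data quote_char)

-- ===== LEMMAS AND PROOFS =====

-- alternating labels starting from flag b: the shape both ports' results share
def pvLabel : Bool → List (List Char) → List (List Char × String)
  | _, [] => []
  | b, p :: ps => (p, if b then "INSIDE" else "OUTSIDE") :: pvLabel (!b) ps

theorem pvModifyHead_eq {α : Type} (l : List α) (f g : α → α) (h : ∀ x, f x = g x) :
    l.modifyHead f = l.modifyHead g := by cases l <;> simp [h]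

theorem pvModifyHead_id {α : Type} (l : List α) : List.modifyHead (fun x => x) l = l := by
  cases l <;> simp

theorem pvLoopA_single (q : Char) (cs : List Char) : ∀ (acc : List Char) (b : Bool),
    pvLoopA [q] cs acc b = pvLabel b ((cs.splitOn q).modifyHead (acc ++ ·)) := by
  induction cs with
  | nil => intro acc b; simp [pvLoopA, List.splitOn, pvLabel]
  | cons c cs ih =>
    intro acc b
    by_cases hc : c = q
    · subst hc
      simp [pvLoopA, List.splitOn, List.splitOnP_cons, pvLabel, ih [] (!b),
        pvModifyHead_id]
    · have hne : ¬ ([c] = [q]) := by simpa using hc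
      simp only [pvLoopA, if_neg hne, ih, List.splitOn, List.splitOnP_cons,
        beq_iff_eq, if_neg hc, List.modifyHead_modifyHead]
      congr 1
      exact pvModifyHead_eq _ _ _ (by intro x; simp)

theorem pvLoopA_other (qc : List Char) (h : ∀ c : Char, [c] ≠ qc) (cs : List Char) :
    ∀ (acc : List Char) (b : Bool),
    pvLoopA qc cs acc b = [(acc ++ cs, if b then "INSIDE" else "OUTSIDE")] := by
  induction cs with
  | nil => intro acc b; simp [pvLoopA]
  | cons c cs ih => intro acc b; simp [pvLoopA, if_neg (h c), ih]

theorem pvEnum_label {β : Type} (g : List Char → β)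
    (ps : List (List Char)) : ∀ (k : Int) (b : Bool),
    (PySem.Int.mod k 2 = 0 ↔ b = false) →
    (PySem.List.enumerate ps k).map (fun ip =>
      (g ip.2, if PySem.Int.mod ip.1 2 == 0 then "OUTSIDE" else "INSIDE"))
      = (pvLabel b ps).map (fun fs => (g fs.1, fs.2)) := by
  induction ps with
  | nil => intro k b _; simp [PySem.List.enumerate, pvLabel]
  | cons p ps ih =>
    intro k b hb
    have h2 : PySem.Int.mod k 2 = k % 2 := PySem.Int.mod_eq_emod_of_pos (by norm_num)
    have h2' : PySem.Int.mod (k + 1) 2 = (k + 1) % 2 :=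
      PySem.Int.mod_eq_emod_of_pos (by norm_num)
    rw [h2] at hb
    have hnext : PySem.Int.mod (k + 1) 2 = 0 ↔ (!b) = false := by
      rw [h2']
      cases b
      · have h0 : k % 2 = 0 := hb.mpr rfl
        simp only [Bool.not_false]
        constructor
        · intro h; exfalso; omega
        · intro h; simp at h
      · have h1 : k % 2 ≠ 0 := fun h => by simpa using hb.mp h
        simp only [Bool.not_true]
        constructor
        · intro _; trivial
        · intro _; omega
    simp only [PySem.List.enumerate, List.map, pvLabel, ih (k + 1) (!b) hnext]
    congr 1
    by_cases hk : k % 2 = 0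
    · have hbf : b = false := hb.mp hk
      subst hbf
      simp [hk]
    · have hbt : b = true := by
        cases b with
        | false => exact absurd (hb.mpr rfl) hk
        | true => rfl
      subst hbt
      simp [hk]

-- ===== VERDICT (by name: the statement is the Claim_ definition above) =====
theorem split_by_quote_char_spec : Claim_equal_split_by_quote_char := by
  intro data quote_char _ hpre
  unfold Spec_split_by_quote_char split_by_quote_char split_by_quote_char_alt
  cases hmx : PySem.List.max? (data.toList ++ quote_char.toList) (fun c => c) with
  | none => exact absurd ((PySem.List.max?_eq_none_iff _ _).mp hmx) hpre
  | some m =>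
    simp only []
    match hq : quote_char.toList with
    | [q] =>
      rw [pvLoopA_single q _ [] false]
      refine Eq.trans ?_ (pvEnum_label
        (fun p => String.ofList (PySem.Chars.replace p [Char.ofNat (m.toNat + 1)] ('\\' :: [q])))
        (List.splitOn q (PySem.Chars.replace data.toList ('\\' :: [q]) [Char.ofNat (m.toNat + 1)]))
        0 false (by decide)).symm
      congr 1
      rw [pvModifyHead_eq _ _ (fun x => x) (by intro x; simp), pvModifyHead_id]
    | [] =>
      rw [pvLoopA_other [] (by intro c; simp) _ [] false]
      simp [PySem.List.enumerate, PySem.Int.mod]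
    | c₁ :: c₂ :: rest =>
      rw [pvLoopA_other (c₁ :: c₂ :: rest) (by intro c; simp) _ [] false]
      simp [PySem.List.enumerate, PySem.Int.mod]
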